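-- pv_equiv track=rewrite | github.com/tuftman-0/TimeBot | bot.py | phonetic
-- ===== SOURCE A (Python) =====
-- def phonetic(t):
--     digits  = ['','one', 'two', 'three', 'four', 'five', 'six', 'seven', 'eight', 'nine']
--     hours   = ['twelve'] + digits[1:] + ['ten', 'eleven']
--     small   = [''] + ["o'-" + x for x in digits[1:]] + ['ten', 'eleven', 'twelve'] + [x + 'teen' for x in ['thir','four','fif','six','seven','eigh','nine']]
--     large   = [x + ('-' if y != '' else '') + y for x in ['twenty','thirty','forty','fifty','sixty'] for y in digits]
--     minutes = small + large
--     h, m    = t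
--     words   = hours[h] + ('-' if m > 0 else '') + minutes[m]
--     return words
-- ===== SOURCE B (Python) =====
-- def phonetic(t):
--     # Direct branching on the minute value instead of building a word table.
--     h, m = t
--     hours = ['twelve', 'one', 'two', 'three', 'four', 'five', 'six',
--              'seven', 'eight', 'nine', 'ten', 'eleven']
--     ones = ['', 'one', 'two', 'three', 'four', 'five', 'six',
--             'seven', 'eight', 'nine']
--     teens = ['thirteen', 'fourteen', 'fifteen', 'sixteen',
--              'seventeen', 'eighteen', 'nineteen']
--     tens = ['twenty', 'thirty', 'forty', 'fifty', 'sixty']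
--     if m == 0:
--         mw = ''
--     elif m <= 9:
--         mw = "o'-" + ones[m]
--     elif m == 10:
--         mw = 'ten'
--     elif m == 11:
--         mw = 'eleven'
--     elif m == 12:
--         mw = 'twelve'
--     elif m <= 19:
--         mw = teens[m - 13]
--     else:
--         mw = tens[m // 10 - 2]
--         if m % 10:
--             mw += '-' + ones[m % 10]
--     return hours[h] + ('-' if m > 0 else '') + mw
-- ===== Notes on version B (the rewrite author's own statement) =====
-- stated objective: simpler
-- what changed: Replaces A's precomputed 70-element minutes table (built from slices and a nested comprehension) with direct branching on the minute value (zero / o'-digit / ten..twelve / teens / tens word plus optional ones word); Pre_ excludes minutes -70..-11, where A still returns a word via negative-index wraparound into its table but B's digit branch raises IndexError.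
-- intended difference: For minutes -10..-1 (not real times) A's negative index wraps into its 70-entry table and returns the word for minute m+70 ('sixty'..'sixty-nine'), while B's digit branch returns "o'-" plus the wrapped digit word; nothing is specified there and B's value is what its natural branching gives. — e.g. on phonetic(0, -5): A returns "twelvesixty-five", B returns "twelveo'-five"
-- outside the precondition, e.g. on phonetic((0, -30)): A returns 'twelveforty', B raises IndexError
import Mathlib
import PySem

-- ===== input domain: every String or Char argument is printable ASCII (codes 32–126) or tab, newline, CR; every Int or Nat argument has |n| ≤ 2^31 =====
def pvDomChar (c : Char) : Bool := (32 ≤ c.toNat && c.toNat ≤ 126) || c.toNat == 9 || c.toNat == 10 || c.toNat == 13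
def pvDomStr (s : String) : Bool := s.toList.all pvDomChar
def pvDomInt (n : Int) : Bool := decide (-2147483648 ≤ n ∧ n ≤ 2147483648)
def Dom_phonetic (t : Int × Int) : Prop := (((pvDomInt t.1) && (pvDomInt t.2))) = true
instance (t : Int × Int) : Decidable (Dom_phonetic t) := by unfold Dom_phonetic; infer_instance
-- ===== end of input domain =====

-- B replaces A's precomputed 70-entry minutes table with direct branching on the
-- minute value (zero / o'-digit / ten..twelve / teens / tens word + optional ones word).

-- ===== PORT A =====
-- Literal transliteration of Source A; list indexing hours[h] / minutes[m] is
-- PySem.List.pyGet? (negative index wraps, out of range = IndexError = none,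
-- excluded by Pre_phonetic; .getD "" is only ever reached outside Pre_).
def phonetic (t : Int × Int) : String :=
  let digits : List String := ["", "one", "two", "three", "four", "five", "six", "seven", "eight", "nine"]
  let hours : List String := ["twelve"] ++ PySem.List.slice digits (some 1) none ++ ["ten", "eleven"]
  let small : List String := [""] ++ (PySem.List.slice digits (some 1) none).map (fun x => "o'-" ++ x)
      ++ ["ten", "eleven", "twelve"]
      ++ (["thir", "four", "fif", "six", "seven", "eigh", "nine"].map (fun x => x ++ "teen"))
  let large : List String :=
    (["twenty", "thirty", "forty", "fifty", "sixty"].flatMap (fun x =>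
      digits.map (fun y => x ++ (if y ≠ "" then "-" else "") ++ y)))
  let minutes : List String := small ++ large
  let h := t.1
  let m := t.2
  (PySem.List.pyGet? hours h).getD "" ++ (if m > 0 then "-" else "") ++ (PySem.List.pyGet? minutes m).getD ""

-- ===== PORT B =====
-- Literal transliteration of Source B; indexing is PySem.List.pyGet? (IndexError = none,
-- reached only outside Pre_phonetic).
def phonetic_alt (t : Int × Int) : String :=
  let h := t.1
  let m := t.2
  let hours : List String := ["twelve", "one", "two", "three", "four", "five", "six",
    "seven", "eight", "nine", "ten", "eleven"]
  let ones : List String := ["", "one", "two", "three", "four", "five", "six", "seven", "eight", "nine"]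
  let teens : List String := ["thirteen", "fourteen", "fifteen", "sixteen", "seventeen", "eighteen", "nineteen"]
  let tens : List String := ["twenty", "thirty", "forty", "fifty", "sixty"]
  let mw : String :=
    if m = 0 then ""
    else if m ≤ 9 then "o'-" ++ (PySem.List.pyGet? ones m).getD ""
    else if m = 10 then "ten"
    else if m = 11 then "eleven"
    else if m = 12 then "twelve"
    else if m ≤ 19 then (PySem.List.pyGet? teens (m - 13)).getD ""
    else
      let tw := (PySem.List.pyGet? tens (PySem.Int.floordiv m 10 - 2)).getD ""
      if PySem.Int.mod m 10 ≠ 0 then tw ++ "-" ++ (PySem.List.pyGet? ones (PySem.Int.mod m 10)).getD ""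
      else tw
  (PySem.List.pyGet? hours h).getD "" ++ (if m > 0 then "-" else "") ++ mw

-- ===== PRECONDITION & SPEC =====
-- Pre_ excludes the inputs on which A raises IndexError (hour outside -12..11 or minute
-- outside -70..69) and the minutes -70..-11, on which A still returns a word via Python's
-- negative-index wraparound into its 70-entry table but B's digit branch raises IndexError.
def Pre_phonetic (t : Int × Int) : Prop := -12 ≤ t.1 ∧ t.1 ≤ 11 ∧ -10 ≤ t.2 ∧ t.2 ≤ 69
instance (t : Int × Int) : Decidable (Pre_phonetic t) := by unfold Pre_phonetic; infer_instance
def pvWitness_phonetic : (Int × Int) := (7, 35)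

-- For minutes -10..-1 (not times at all) A's negative index wraps into its table and returns
-- the word for minute m+70 ('sixty'…'sixty-nine'), while B's digit branch returns "o'-" plus
-- the wrapped digit word; no behaviour is specified there and B's is the natural branching value.
def D_phonetic (t : Int × Int) : Prop := -10 ≤ t.2 ∧ t.2 ≤ -1
instance (t : Int × Int) : Decidable (D_phonetic t) := by unfold D_phonetic; infer_instance
def Spec_phonetic (t : Int × Int) (out : String) : Prop := ¬ D_phonetic t → out = phonetic_alt t
instance (t : Int × Int) (out : String) : Decidable (Spec_phonetic t out) := by unfold Spec_phonetic; infer_instance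
def pvDiffWitness_phonetic : (Int × Int) := (0, -5)
def pvDiffWitnessOut_phonetic : String × String := ("twelvesixty-five", "twelveo'-five")

-- ===== CLAIM (what is proved, stated in full; the proofs are below) =====
def Claim_unchanged_phonetic : Prop := ∀ (t : Int × Int), Dom_phonetic t → Pre_phonetic t → Spec_phonetic t (phonetic t)
def Claim_changed_phonetic : Prop := Dom_phonetic (pvDiffWitness_phonetic) ∧ Pre_phonetic (pvDiffWitness_phonetic) ∧ D_phonetic (pvDiffWitness_phonetic) ∧ phonetic (pvDiffWitness_phonetic) = pvDiffWitnessOut_phonetic.1 ∧ phonetic_alt (pvDiffWitness_phonetic) = pvDiffWitnessOut_phonetic.2 ∧ pvDiffWitnessOut_phonetic.1 ≠ pvDiffWitnessOut_phonetic.2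
def Claim_exact_phonetic : Prop := ∀ (t : Int × Int), Dom_phonetic t → Pre_phonetic t → D_phonetic t → phonetic t ≠ phonetic_alt t

-- ===== LEMMAS AND PROOFS =====
-- The hour word of port A (verbatim subterm of `phonetic`).
def pvHwA (h : Int) : String :=
  (PySem.List.pyGet? (["twelve"]
    ++ PySem.List.slice ["", "one", "two", "three", "four", "five", "six", "seven", "eight", "nine"] (some 1) none
    ++ ["ten", "eleven"]) h).getD ""

-- The minute word of port A (verbatim subterm of `phonetic`).
def pvMwA (m : Int) : String :=
  let digits : List String := ["", "one", "two", "three", "four", "five", "six", "seven", "eight", "nine"]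
  (PySem.List.pyGet?
    (([""] ++ (PySem.List.slice digits (some 1) none).map (fun x => "o'-" ++ x)
      ++ ["ten", "eleven", "twelve"]
      ++ (["thir", "four", "fif", "six", "seven", "eigh", "nine"].map (fun x => x ++ "teen")))
     ++ (["twenty", "thirty", "forty", "fifty", "sixty"].flatMap (fun x =>
          digits.map (fun y => x ++ (if y ≠ "" then "-" else "") ++ y)))) m).getD ""

-- The hour word of port B (verbatim subterm of `phonetic_alt`).
def pvHwB (h : Int) : String :=
  (PySem.List.pyGet? ["twelve", "one", "two", "three", "four", "five", "six",
    "seven", "eight", "nine", "ten", "eleven"] h).getD ""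

-- The minute word of port B (verbatim subterm of `phonetic_alt`).
def pvMwB (m : Int) : String :=
  let ones : List String := ["", "one", "two", "three", "four", "five", "six", "seven", "eight", "nine"]
  if m = 0 then ""
  else if m ≤ 9 then "o'-" ++ (PySem.List.pyGet? ones m).getD ""
  else if m = 10 then "ten"
  else if m = 11 then "eleven"
  else if m = 12 then "twelve"
  else if m ≤ 19 then (PySem.List.pyGet? ["thirteen", "fourteen", "fifteen", "sixteen", "seventeen", "eighteen", "nineteen"] (m - 13)).getD ""
  else
    let tw := (PySem.List.pyGet? ["twenty", "thirty", "forty", "fifty", "sixty"] (PySem.Int.floordiv m 10 - 2)).getD ""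
    if PySem.Int.mod m 10 ≠ 0 then tw ++ "-" ++ (PySem.List.pyGet? ones (PySem.Int.mod m 10)).getD ""
    else tw

lemma phonetic_decomp (h m : Int) :
    phonetic (h, m) = pvHwA h ++ (if m > 0 then "-" else "") ++ pvMwA m := rfl

lemma phonetic_alt_decomp (h m : Int) :
    phonetic_alt (h, m) = pvHwB h ++ (if m > 0 then "-" else "") ++ pvMwB m := rfl

lemma hw_eq : ∀ a : Nat, a < 24 → pvHwA ((a : Int) - 12) = pvHwB ((a : Int) - 12) := by decide

set_option maxRecDepth 2000 in
lemma mw_eq : ∀ b : Nat, b < 70 → pvMwA ((b : Int)) = pvMwB ((b : Int)) := by decide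

set_option maxRecDepth 2000 in
lemma mw_ne : ∀ b : Nat, b < 10 →
    pvMwA ((b : Int) - 10) ≠ pvMwB ((b : Int) - 10) ∧ pvMwA ((b : Int) - 10) ≠ "" := by decide

-- ===== VERDICT (by name: the statement is the Claim_ definition above) =====
theorem phonetic_spec : Claim_unchanged_phonetic := by
  intro t _ hpre
  obtain ⟨h, m⟩ := t
  obtain ⟨h1, h2, h3, h4⟩ := hpre
  intro hnd
  unfold D_phonetic at hnd
  simp only [not_and, not_le] at hnd
  have hm0 : 0 ≤ m := by by_cases hc : -10 ≤ m <;> omega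
  have hh := hw_eq (h + 12).toNat (by omega)
  have hm := mw_eq m.toNat (by omega)
  have e1 : ((h + 12).toNat : Int) - 12 = h := by omega
  have e2 : ((m.toNat : Int)) = m := by omega
  rw [e1] at hh
  rw [e2] at hm
  unfold Spec_phonetic at *
  rw [phonetic_decomp, phonetic_alt_decomp, hh, hm]

theorem phonetic_changed : Claim_changed_phonetic := by
  unfold Claim_changed_phonetic; decide

theorem phonetic_tight : Claim_exact_phonetic := by
  intro t _ hpre hd
  obtain ⟨h, m⟩ := t
  obtain ⟨h1, h2, h3, h4⟩ := hpre
  obtain ⟨d1, d2⟩ := hd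
  have hh := hw_eq (h + 12).toNat (by omega)
  have hmne := mw_ne (m + 10).toNat (by omega)
  have e1 : ((h + 12).toNat : Int) - 12 = h := by omega
  have e2 : ((m + 10).toNat : Int) - 10 = m := by omega
  rw [e1] at hh
  rw [e2] at hmne
  rw [phonetic_decomp, phonetic_alt_decomp, hh]
  have hdash : (if m > 0 then "-" else "") = "" := by
    have : ¬ m > 0 := by omega
    simp [this]
  rw [hdash]
  intro heq
  have h2 := congrArg String.toList heq
  simp only [String.toList_append, List.append_cancel_left_eq] at h2
  exact hmne.1 (String.toList_inj.mp h2)
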